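-- pv_equiv track=rewrite | github.com/cyversewarwick/csi | csi/csi.py | parentalSets
-- ===== SOURCE A (Python) =====
-- import itertools as it
--
-- def parentalSets(items, item, depth, tfs=None):
--     """Iterate over all "Parental Sets".
--
--     A parental set is a list of regulators/transcription factors for a
--     specific gene.  The parental sets for any given item is every
--     subset of items up to a given depth that does not include the
--     item.
--     """
--
--     # filter to TFs if needed
--     if tfs is not None:
--         # duplicate list to avoid modifying callers state
--         items = list(tfs)
--
--     # exclude the target if needed
--     if item in items:
--         # duplicate list to avoid modifying callers state
--         items = list(items)
--         items.remove(item)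
--
--     for i in range(0, depth+1):
--         # iterate over every subset of size i
--         for subset in it.combinations(items, i):
--             yield (list(subset),item)
-- ===== SOURCE B (Python) =====
-- def _combos(pool, need, acc, item):
--     # include/exclude recursion over the pool, lexicographic order
--     if need == 0:
--         yield (list(acc), item)
--     elif len(pool) < need:
--         return
--     else:
--         head, rest = pool[0], pool[1:]
--         yield from _combos(rest, need - 1, acc + [head], item)
--         yield from _combos(rest, need, acc, item)
--
-- def parentalSets(items, item, depth, tfs=None):
--     pool = list(tfs) if tfs is not None else list(items)
--     if item in pool:
--         pool.remove(item)
--     top = min(depth, len(pool))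
--     for need in range(0, top + 1):
--         yield from _combos(pool, need, [], item)
-- ===== Notes on version B (the rewrite author's own statement) =====
-- stated objective: alternative
-- what changed: Replaces itertools.combinations with a recursive include/exclude generator over the pool (with an accumulated prefix and a too-few-items prune) and caps the outer size loop at min(depth, len(pool)).
import Mathlib
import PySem

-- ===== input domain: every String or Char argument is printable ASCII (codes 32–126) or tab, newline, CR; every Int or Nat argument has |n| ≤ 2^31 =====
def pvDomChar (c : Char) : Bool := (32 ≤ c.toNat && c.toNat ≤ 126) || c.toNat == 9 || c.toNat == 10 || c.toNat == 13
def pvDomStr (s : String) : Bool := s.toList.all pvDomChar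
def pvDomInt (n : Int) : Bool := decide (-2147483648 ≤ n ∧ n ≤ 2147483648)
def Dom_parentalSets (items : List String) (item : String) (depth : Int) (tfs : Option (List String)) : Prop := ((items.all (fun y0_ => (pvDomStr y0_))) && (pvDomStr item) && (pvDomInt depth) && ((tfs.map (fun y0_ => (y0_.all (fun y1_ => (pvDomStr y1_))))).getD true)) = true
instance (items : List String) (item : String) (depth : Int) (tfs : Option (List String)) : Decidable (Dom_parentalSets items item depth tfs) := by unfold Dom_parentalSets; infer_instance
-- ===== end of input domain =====

-- B replaces itertools.combinations with a recursive include/exclude enumeration and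
-- caps the outer size loop at min(depth, len(pool)); same return value (objective: alternative).
-- Both Pythons are generators; the ports list their yields. Neither mutates the caller's list.

-- ===== PORT A =====
-- exact port of itertools.combinations(pool, k): all k-subsequences in lexicographic order
def combinationsA : List String → Nat → List (List String)
  | _, 0 => [[]]
  | [], _ + 1 => []
  | x :: xs, k + 1 => (combinationsA xs k).map (fun s => x :: s) ++ combinationsA xs (k + 1)

def parentalSets (items : List String) (item : String) (depth : Int) (tfs : Option (List String)) : List (List String × String) :=
  -- if tfs is not None: items = list(tfs)
  let items1 : List String := match tfs with | some t => t | none => items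
  -- if item in items: items = list(items); items.remove(item)
  let items2 : List String :=
    if items1.contains item then (PySem.List.remove? items1 item).getD items1 else items1
  -- for i in range(0, depth+1): for subset in it.combinations(items, i): yield (list(subset), item)
  (PySem.List.pyRange 0 (depth + 1) 1).foldl
    (fun acc i => acc ++ (combinationsA items2 i.toNat).map (fun s => (s, item))) []

-- ===== PORT B =====
-- _combos: include/exclude recursion with accumulated prefix and a len(pool) < need prune
def combosB : Nat → List String → List String → String → List (List String × String)
  | 0, _, acc, item => [(acc, item)]
  | k + 1, pool, acc, item =>
    if pool.length < k + 1 then []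
    else
      match pool with
      | [] => []
      | head :: rest => combosB k rest (acc ++ [head]) item ++ combosB (k + 1) rest acc item
  termination_by _k pool => pool.length

def parentalSets_alt (items : List String) (item : String) (depth : Int) (tfs : Option (List String)) : List (List String × String) :=
  let pool : List String := match tfs with | some t => t | none => items
  let pool2 : List String :=
    if pool.contains item then (PySem.List.remove? pool item).getD pool else pool
  let top : Int := min depth (pool2.length : Int)
  (PySem.List.pyRange 0 (top + 1) 1).foldl
    (fun acc need => acc ++ combosB need.toNat pool2 [] item) []

-- ===== PRECONDITION & SPEC =====
def Spec_parentalSets (items : List String) (item : String) (depth : Int) (tfs : Option (List String)) (out : List (List String × String)) : Prop := out = parentalSets_alt items item depth tfs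
instance (items : List String) (item : String) (depth : Int) (tfs : Option (List String)) (out : List (List String × String)) : Decidable (Spec_parentalSets items item depth tfs out) := by unfold Spec_parentalSets; infer_instance

-- ===== CLAIM (what is proved, stated in full; the proofs are below) =====
def Claim_equal_parentalSets : Prop := ∀ (items : List String) (item : String) (depth : Int) (tfs : Option (List String)), Dom_parentalSets items item depth tfs → Spec_parentalSets items item depth tfs (parentalSets items item depth tfs)

-- ===== LEMMAS AND PROOFS =====

theorem combinationsA_of_short : ∀ (pool : List String) (k : Nat), pool.length < k → combinationsA pool k = [] := by
  intro pool
  induction pool with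
  | nil => intro k h; cases k with
    | zero => omega
    | succ k => simp [combinationsA]
  | cons x xs ih =>
    intro k h
    cases k with
    | zero => omega
    | succ k =>
      simp only [List.length_cons] at h
      simp [combinationsA, ih k (by omega), ih (k + 1) (by omega)]

theorem combosB_eq : ∀ (pool : List String) (k : Nat) (acc : List String) (item : String),
    combosB k pool acc item = (combinationsA pool k).map (fun s => (acc ++ s, item)) := by
  intro pool
  induction pool with
  | nil =>
    intro k acc item
    cases k with
    | zero => simp [combosB, combinationsA]
    | succ k => simp [combosB, combinationsA]
  | cons x xs ih =>
    intro k acc item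
    cases k with
    | zero => simp [combosB, combinationsA]
    | succ k =>
      by_cases h : (x :: xs).length < k + 1
      · simp only [combosB, if_pos h, combinationsA_of_short _ _ h, List.map_nil]
      · simp only [combosB, if_neg h, combinationsA, List.map_append, List.map_map, ih]
        congr 1
        simp [Function.comp]

theorem parentalSets_spec_aux (items : List String) (item : String) (depth : Int) (tfs : Option (List String)) :
    parentalSets items item depth tfs = parentalSets_alt items item depth tfs := by
  unfold parentalSets parentalSets_alt
  set pool := (match tfs with | some t => t | none => items) with hpool
  set pool2 := (if pool.contains item then (PySem.List.remove? pool item).getD pool else pool) with hpool2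
  rw [PySem.List.foldl_append_eq_flatMap, PySem.List.foldl_append_eq_flatMap]
  simp only [List.nil_append]
  have hfun : ∀ i : Int, combosB i.toNat pool2 [] item
      = (combinationsA pool2 i.toNat).map (fun s => (s, item)) := by
    intro i; rw [combosB_eq]; simp
  by_cases hle : depth ≤ (pool2.length : Int)
  · rw [min_eq_left hle]
    exact List.flatMap_congr (fun i _ => (hfun i).symm)
  · rw [not_le] at hle
    rw [min_eq_right (le_of_lt hle)]
    rw [PySem.List.pyRange_one_append 0 ((pool2.length : Int) + 1) (depth + 1)
        (by positivity) (by omega)]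
    rw [List.flatMap_append]
    have hnil : (PySem.List.pyRange ((pool2.length : Int) + 1) (depth + 1) 1).flatMap
        (fun i => (combinationsA pool2 i.toNat).map (fun s => (s, item))) = [] := by
      apply List.flatMap_eq_nil_iff.mpr
      intro i hi
      rw [PySem.List.mem_pyRange_one] at hi
      rw [combinationsA_of_short pool2 i.toNat (by omega)]
      simp
    rw [hnil, List.append_nil]
    exact List.flatMap_congr (fun i _ => (hfun i).symm)

-- ===== VERDICT (by name: the statement is the Claim_ definition above) =====
theorem parentalSets_spec : Claim_equal_parentalSets := by
  intro items item depth tfs _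
  unfold Spec_parentalSets
  exact parentalSets_spec_aux items item depth tfs
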